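-- pv_equiv track=rewrite | github.com/omarbessi04/RU_programming1 | FORR1/FORR1 - Assignments/relations.py | aces_in_relation_e
-- ===== SOURCE A (Python) =====
-- def aces_in_relation_e(A):
--     # first create the given relation, then count the number of items in that relation
--     relation = []
--     for item1 in A:
--         for item2 in A[::-1]:
--             # go both forwards (item1) and backwards (item2) through the given set A
--
--             if item1 + item2 >= 1001:
--                 # if the addition of the numbers is bigger than or equal to 1001, add it to the list
--                 # also, check if we've previously added this pair to the relation list, \
--                 # (586 + 685) is larger than 1001, but so is (685 + 586), we only want to count this pair once
--                 if not((item1, item2) in A or (item2, item1) in A):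
--                     relation.append((item1, item2))
--             else:
--                 # if item1 + item2 is ever less than 1001, \
--                 # the next value associated with item2 will be x-1 where x is the current value of item2
--                 # this new value of item2 will be smaller than the current value of item2
--                 # so that item1 + item2 will also be smaller than 1001
--                 # this program is already in O(n**2) so we can cut down on a little time by breaking here
--                 break
--
--     return len(relation)
-- ===== SOURCE B (Python) =====
-- def aces_in_relation_e(A):
--     # Running prefix-minima of reversed(A) are nonincreasing, so for each x the
--     # length of the prefix of reversed(A) whose sums with x stay >= 1001 can be
--     # found by binary search instead of walking the inner loop.
--     mins = []
--     cur = None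
--     for y in reversed(A):
--         cur = y if cur is None else min(cur, y)
--         mins.append(cur)
--     total = 0
--     n = len(mins)
--     for x in A:
--         t = 1001 - x
--         lo, hi = 0, n
--         while lo < hi:
--             mid = (lo + hi) // 2
--             if mins[mid] >= t:
--                 lo = mid + 1
--             else:
--                 hi = mid
--         total += lo
--     return total
-- ===== Notes on version B (the rewrite author's own statement) =====
-- stated objective: faster
-- what changed: Instead of the nested loop with break (plus a per-pair membership scan that is always False since tuples never occur in a list of ints), B builds the prefix-minima of reversed(A) once and binary-searches, for each x, how long the prefix keeps x+y >= 1001.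
import Mathlib
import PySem

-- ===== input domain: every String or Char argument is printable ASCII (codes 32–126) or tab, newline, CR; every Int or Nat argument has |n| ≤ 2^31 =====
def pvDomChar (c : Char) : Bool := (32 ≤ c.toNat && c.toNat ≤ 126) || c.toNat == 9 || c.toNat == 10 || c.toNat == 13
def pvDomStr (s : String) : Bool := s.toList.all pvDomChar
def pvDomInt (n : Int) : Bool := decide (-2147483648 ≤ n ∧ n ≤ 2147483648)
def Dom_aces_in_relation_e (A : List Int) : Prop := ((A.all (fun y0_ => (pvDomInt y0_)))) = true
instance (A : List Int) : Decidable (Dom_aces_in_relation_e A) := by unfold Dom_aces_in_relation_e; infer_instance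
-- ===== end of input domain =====

-- B replaces A's nested loop (with its always-False tuple-membership scan) by prefix minima of
-- reversed(A) plus a per-element binary search; objective: faster.

-- ===== PORT A =====
-- inner 'for item2 in A[::-1]' loop with its break; 'rel' is the relation list being built.
-- Python's '(item1, item2) in A' compares a tuple with each int of A: tuple == int is always
-- False in Python, so the membership test is a scan of A that always yields False; it is
-- ported exactly as that scan ('A.any (fun _ => false)').
def pvInnerA (A : List Int) (item1 : Int) : List Int → List (Int × Int) → List (Int × Int)
  | [], rel => rel
  | item2 :: rest, rel =>
    if 1001 ≤ item1 + item2 then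
      if ¬(A.any (fun _ => false) = true ∨ A.any (fun _ => false) = true) then
        pvInnerA A item1 rest (rel ++ [(item1, item2)])
      else
        pvInnerA A item1 rest rel
    else rel  -- break

def aces_in_relation_e (A : List Int) : Int :=
  ((A.foldl
      (fun rel item1 =>
        pvInnerA A item1 ((PySem.List.slice? A none none (-1)).getD []) rel)  -- A[::-1]
      []).length : Int)

-- ===== PORT B =====
-- running prefix minima of reversed(A)  (Python: cur = y if cur is None else min(cur, y))
def pvPrefixMins : List Int → Option Int → List Int → List Int
  | [], _, mins => mins
  | y :: rest, cur, mins =>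
    let c := match cur with
      | none => y
      | some c0 => min c0 y
    pvPrefixMins rest (some c) (mins ++ [c])

-- binary search: first index lo with mins[lo] < t (mins nonincreasing); mid is always in
-- range, so 'getD mid 0' is exact for Python's 'mins[mid]'.
def pvBSearch (mins : List Int) (t : Int) (lo hi : Nat) : Nat :=
  if h : lo < hi then
    let mid := (lo + hi) / 2
    if t ≤ mins.getD mid 0 then pvBSearch mins t (mid + 1) hi
    else pvBSearch mins t lo mid
  else lo
termination_by hi - lo
decreasing_by all_goals omega

def aces_in_relation_e_alt (A : List Int) : Int :=
  let mins := pvPrefixMins A.reverse none []   -- reversed(A)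
  let n := mins.length
  A.foldl (fun total x => total + ((pvBSearch mins (1001 - x) 0 n : Nat) : Int)) 0

-- ===== PRECONDITION & SPEC =====
def Spec_aces_in_relation_e (A : List Int) (out : Int) : Prop := out = aces_in_relation_e_alt A
instance (A : List Int) (out : Int) : Decidable (Spec_aces_in_relation_e A out) := by unfold Spec_aces_in_relation_e; infer_instance

-- ===== CLAIM (what is proved, stated in full; the proofs are below) =====
def Claim_equal_aces_in_relation_e : Prop := ∀ (A : List Int), Dom_aces_in_relation_e A → Spec_aces_in_relation_e A (aces_in_relation_e A)

-- ===== LEMMAS AND PROOFS =====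

-- reference: number of leading elements of l that are ≥ t
def kcount (t : Int) (l : List Int) : Nat := (l.takeWhile (fun y => decide (t ≤ y))).length

-- reference: running minima starting from accumulator c
def pm (c : Int) : List Int → List Int
  | [] => []
  | y :: r => (min c y) :: pm (min c y) r

theorem tw_mem (l : List Int) (p : Int → Bool) (i : Nat) (d : Int)
    (h : i < (l.takeWhile p).length) : p (l.getD i d) = true := by
  induction l generalizing i with
  | nil => simp at h
  | cons y r ih =>
    by_cases hp : p y = true
    · cases i with
      | zero => simpa using hp
      | succ j =>
        simp only [List.takeWhile_cons, hp, if_true, List.length_cons] at h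
        simpa using ih j (by omega)
    · simp only [List.takeWhile_cons] at h
      rw [if_neg hp] at h
      simp at h

theorem tw_stop (l : List Int) (p : Int → Bool) (d : Int)
    (h : (l.takeWhile p).length < l.length) : p (l.getD (l.takeWhile p).length d) = false := by
  induction l with
  | nil => simp at h
  | cons y r ih =>
    by_cases hp : p y = true
    · simp only [List.takeWhile_cons, hp, if_true, List.length_cons] at h ⊢
      simpa using ih (by omega)
    · simp only [List.takeWhile_cons] at h ⊢
      rw [if_neg hp] at h ⊢
      simpa using hp

-- ----- A side -----

theorem innerA_eq (A : List Int) (x : Int) (l : List Int) (rel : List (Int × Int)) :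
    pvInnerA A x l rel = rel ++ (l.takeWhile (fun y => decide (1001 ≤ x + y))).map (fun y => (x, y)) := by
  induction l generalizing rel with
  | nil => simp [pvInnerA]
  | cons y r ih =>
    by_cases h : 1001 ≤ x + y
    · simp [pvInnerA, h, ih]
    · simp [pvInnerA, h]

theorem foldl_len (A R : List Int) (l : List Int) (init : List (Int × Int)) :
    ((l.foldl (fun rel x => pvInnerA A x R rel) init).length : Int)
      = (init.length : Int) + (l.map (fun x => (kcount (1001 - x) R : Int))).sum := by
  induction l generalizing init with
  | nil => simp
  | cons x r ih =>
    simp only [List.foldl_cons, List.map_cons, List.sum_cons]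
    rw [ih, innerA_eq]
    have : (R.takeWhile fun y => decide (1001 ≤ x + y)) = (R.takeWhile fun y => decide (1001 - x ≤ y)) := by
      congr 1
      funext y
      simp only [decide_eq_decide]
      omega
    simp [this, kcount]
    ring

theorem aces_sum (A : List Int) :
    aces_in_relation_e A = (A.map (fun x => (kcount (1001 - x) A.reverse : Int))).sum := by
  unfold aces_in_relation_e
  rw [PySem.List.slice?_none_none_neg_one]
  simpa using foldl_len A A.reverse A []

-- ----- B side: prefix minima -----

theorem prefixMins_some (l : List Int) (c : Int) (acc : List Int) :
    pvPrefixMins l (some c) acc = acc ++ pm c l := by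
  induction l generalizing c acc with
  | nil => simp [pvPrefixMins, pm]
  | cons y r ih => simp [pvPrefixMins, pm, ih]

theorem prefixMins_none (l : List Int) :
    pvPrefixMins l none [] = match l with
      | [] => []
      | y :: r => pm y (y :: r) := by
  cases l with
  | nil => simp [pvPrefixMins]
  | cons y r =>
    simp only [pvPrefixMins, pm, min_self]
    rw [prefixMins_some]
    simp

theorem pm_le (l : List Int) (c : Int) (j : Nat) (h : j < (pm c l).length) :
    (pm c l).getD j 0 ≤ c := by
  induction l generalizing c j with
  | nil => simp [pm] at h
  | cons y r ih =>
    cases j with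
    | zero => simp [pm]
    | succ j' =>
      simp only [pm, List.length_cons] at h
      have := ih (min c y) j' (by omega)
      simp only [pm, List.getD_cons_succ]
      exact le_trans this (min_le_left _ _)

theorem pm_mono (l : List Int) (c : Int) (i j : Nat) (hij : i ≤ j) (hj : j < (pm c l).length) :
    (pm c l).getD j 0 ≤ (pm c l).getD i 0 := by
  induction l generalizing c i j with
  | nil => simp [pm] at hj
  | cons y r ih =>
    cases i with
    | zero =>
      cases j with
      | zero => simp
      | succ j' =>
        simp only [pm, List.length_cons] at hj
        simp only [pm, List.getD_cons_succ, List.getD_cons_zero]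
        exact pm_le r (min c y) j' (by omega)
    | succ i' =>
      cases j with
      | zero => omega
      | succ j' =>
        simp only [pm, List.length_cons] at hj
        simp only [pm, List.getD_cons_succ]
        exact ih (min c y) i' j' (by omega) (by omega)

theorem pm_count (l : List Int) (c t : Int) (hc : t ≤ c) :
    kcount t (pm c l) = kcount t l := by
  induction l generalizing c with
  | nil => simp [pm]
  | cons y r ih =>
    by_cases hy : t ≤ y
    · have h1 : t ≤ min c y := le_min hc hy
      simp only [kcount, pm, List.takeWhile_cons, decide_eq_true h1, decide_eq_true hy,
        if_true, List.length_cons]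
      have := ih (min c y) h1
      simp only [kcount] at this
      omega
    · have h1 : ¬ t ≤ min c y := fun h => hy (le_trans h (min_le_right _ _))
      simp [kcount, pm, hy, h1]

theorem mins_count (R : List Int) (t : Int) :
    kcount t (pvPrefixMins R none []) = kcount t R := by
  rw [prefixMins_none]
  cases R with
  | nil => rfl
  | cons y r =>
    by_cases hy : t ≤ y
    · simp only [pm, min_self, kcount, List.takeWhile_cons, decide_eq_true hy, if_true,
        List.length_cons]
      have := pm_count r y t hy
      simp only [kcount] at this
      omega
    · simp [pm, min_self, kcount, hy]

theorem mins_mono (R : List Int) (i j : Nat) (hij : i ≤ j)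
    (hj : j < (pvPrefixMins R none []).length) :
    (pvPrefixMins R none []).getD j 0 ≤ (pvPrefixMins R none []).getD i 0 := by
  rw [prefixMins_none] at *
  cases R with
  | nil => simp at hj
  | cons y r => exact pm_mono (y :: r) y i j hij hj

-- ----- binary search -----

theorem bsearch_eq (m : List Int) (t : Int)
    (hmono : ∀ i j, i ≤ j → j < m.length → m.getD j 0 ≤ m.getD i 0) :
    ∀ d lo hi, hi - lo ≤ d → lo ≤ kcount t m → kcount t m ≤ hi → hi ≤ m.length →
      pvBSearch m t lo hi = kcount t m := by
  intro d
  induction d with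
  | zero =>
    intro lo hi hd hlo hhi _
    unfold pvBSearch
    rw [dif_neg (by omega)]
    omega
  | succ d ih =>
    intro lo hi hd hlo hhi hlen
    by_cases h : lo < hi
    · unfold pvBSearch
      rw [dif_pos h]
      have hmid1 : lo ≤ (lo + hi) / 2 := by omega
      have hmid2 : (lo + hi) / 2 < hi := by omega
      by_cases ht : t ≤ m.getD ((lo + hi) / 2) 0
      · rw [if_pos ht]
        have hk : (lo + hi) / 2 < kcount t m := by
          by_contra hk
          have hkl : kcount t m < m.length := by omega
          have h1 := tw_stop m (fun y => decide (t ≤ y)) 0 hkl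
          rw [show (List.takeWhile (fun y => decide (t ≤ y)) m).length = kcount t m from rfl] at h1
          simp only [decide_eq_false_iff_not, not_le] at h1
          have h2 := hmono (kcount t m) ((lo + hi) / 2) (by omega) (by omega)
          omega
        exact ih ((lo + hi) / 2 + 1) hi (by omega) (by omega) hhi hlen
      · rw [if_neg ht]
        have hk : kcount t m ≤ (lo + hi) / 2 := by
          by_contra hk
          have h1 := tw_mem m (fun y => decide (t ≤ y)) ((lo + hi) / 2) 0
            (by rw [show (List.takeWhile (fun y => decide (t ≤ y)) m).length = kcount t m from rfl]; omega)
          simp only [decide_eq_true_eq] at h1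
          exact ht h1
        exact ih lo ((lo + hi) / 2) (by omega) hlo hk (by omega)
    · unfold pvBSearch
      rw [dif_neg h]
      omega

-- ----- B side total -----

theorem alt_sum (A : List Int) :
    aces_in_relation_e_alt A = (A.map (fun x => (kcount (1001 - x) A.reverse : Int))).sum := by
  unfold aces_in_relation_e_alt
  have hbs : ∀ x : Int,
      pvBSearch (pvPrefixMins A.reverse none []) (1001 - x) 0 (pvPrefixMins A.reverse none []).length
        = kcount (1001 - x) A.reverse := by
    intro x
    rw [← mins_count A.reverse (1001 - x)]
    exact bsearch_eq _ _ (mins_mono A.reverse) (pvPrefixMins A.reverse none []).length 0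
      (pvPrefixMins A.reverse none []).length (by omega) (by omega)
      ((List.takeWhile_sublist _).length_le) (le_refl _)
  simp only [hbs]
  have hfold : ∀ (l : List Int) (init : Int),
      l.foldl (fun total x => total + ((kcount (1001 - x) A.reverse : Nat) : Int)) init
        = init + (l.map (fun x => (kcount (1001 - x) A.reverse : Int))).sum := by
    intro l
    induction l with
    | nil => simp
    | cons x r ih =>
      intro init
      simp only [List.foldl_cons, List.map_cons, List.sum_cons, ih]
      ring
  simpa using hfold A 0

-- ===== VERDICT (by name: the statement is the Claim_ definition above) =====
theorem aces_in_relation_e_spec : Claim_equal_aces_in_relation_e := by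
  intro A _
  unfold Spec_aces_in_relation_e
  rw [aces_sum, alt_sum]
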